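-- pv_equiv track=rewrite | github.com/Rohitw3code/app-connectivity | effectiveness.py | _classify_project_type
-- ===== SOURCE A (Python) =====
-- from typing import Optional, Any
--
-- def _classify_project_type(type_str: Optional[str]) -> dict:
--     """
--     From 'Type of Project', determine capacity breakdown categories.
--     Returns dict with keys: solar, wind, ess, hydro, hybrid (bool/str).
--     """
--     if not type_str:
--         return {}
--     t = type_str.lower().strip()
--     categories = []
--     if "solar" in t:
--         categories.append("solar")
--     if "wind" in t:
--         categories.append("wind")
--     if "ess" in t or "energy storage" in t or "bess" in t:
--         categories.append("ess")
--     if "hydro" in t or "pump" in t or "psp" in t: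
--         categories.append("hydro")
--     if len(categories) > 1 or "hybrid" in t:
--         categories.append("hybrid")
--     return {cat: True for cat in categories}
-- ===== SOURCE B (Python) =====
-- # One left-to-right scan over the text: at each position, test which keywords
-- # start there (a simple multi-pattern matcher), collecting hit categories into
-- # a set; the result dict is then assembled from the fixed category order.
-- _KEYWORDS = [
--     ("solar", "solar"), ("wind", "wind"),
--     ("ess", "ess"), ("energy storage", "ess"), ("bess", "ess"),
--     ("hydro", "hydro"), ("pump", "hydro"), ("psp", "hydro"),
--     ("hybrid", "hybrid"),
-- ]
--
-- def _classify_project_type(type_str):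
--     if not type_str:
--         return {}
--     t = type_str.lower().strip()
--     found = set()
--     for i in range(len(t) + 1):
--         for kw, cat in _KEYWORDS:
--             if t.startswith(kw, i):
--                 found.add(cat)
--     result = {c: True for c in ("solar", "wind", "ess", "hydro") if c in found}
--     if len(result) > 1 or "hybrid" in found:
--         result["hybrid"] = True
--     return result
-- ===== Notes on version B (the rewrite author's own statement) =====
-- stated objective: alternative
-- what changed: Instead of A's four independent whole-string substring tests, B runs one left-to-right scan of the text, at each position matching all keywords of a flattened keyword-to-category table (a simple multi-pattern matcher) and collecting hit categories into a set; the result dict is then assembled from the fixed category order with the hybrid post-step.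
import Mathlib
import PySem

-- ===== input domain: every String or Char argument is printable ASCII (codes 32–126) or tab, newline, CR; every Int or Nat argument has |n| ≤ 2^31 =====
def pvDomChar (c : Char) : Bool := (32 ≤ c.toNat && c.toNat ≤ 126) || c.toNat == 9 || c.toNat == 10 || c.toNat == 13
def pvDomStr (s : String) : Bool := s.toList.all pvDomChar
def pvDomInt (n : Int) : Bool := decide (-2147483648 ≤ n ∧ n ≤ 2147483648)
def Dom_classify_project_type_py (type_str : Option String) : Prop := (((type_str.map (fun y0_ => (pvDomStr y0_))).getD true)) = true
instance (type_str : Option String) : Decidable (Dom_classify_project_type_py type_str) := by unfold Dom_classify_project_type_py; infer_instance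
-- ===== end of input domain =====

-- B replaces A's four independent whole-string substring tests with a single left-to-right
-- scan of the text that matches all keywords position by position (a simple multi-pattern
-- matcher) collecting categories into a set; alternative decomposition, same results.

-- ===== PORT A =====
def classify_project_type_py (type_str : Option String) : List (String × Bool) :=
  match type_str with
  | none => []
  | some s =>
    if s = "" then [] else
    let t := PySem.Str.strip (PySem.Str.lower s)
    let categories : List String := []
    let categories := if PySem.Str.isIn "solar" t then categories ++ ["solar"] else categories
    let categories := if PySem.Str.isIn "wind" t then categories ++ ["wind"] else categories
    let categories := if PySem.Str.isIn "ess" t || PySem.Str.isIn "energy storage" t || PySem.Str.isIn "bess" t then categories ++ ["ess"] else categories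
    let categories := if PySem.Str.isIn "hydro" t || PySem.Str.isIn "pump" t || PySem.Str.isIn "psp" t then categories ++ ["hydro"] else categories
    let categories := if categories.length > 1 || PySem.Str.isIn "hybrid" t then categories ++ ["hybrid"] else categories
    (categories.foldl (fun d c => d.insert c true) PySem.Dict.empty).items

-- ===== PORT B =====
def pvKeywords : List (String × String) :=
  [("solar", "solar"), ("wind", "wind"),
   ("ess", "ess"), ("energy storage", "ess"), ("bess", "ess"),
   ("hydro", "hydro"), ("pump", "hydro"), ("psp", "hydro"),
   ("hybrid", "hybrid")]

-- the position scan: for i in range(len(t)+1): for kw, cat in _KEYWORDS: if t.startswith(kw, i): found.add(cat)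
-- t.startswith(kw, i) with the nonnegative i from range is exactly: kw.toList prefix of t.toList.drop i.toNat
def pvScan (t : String) : PySem.Set String :=
  (PySem.List.pyRange 0 (PySem.Str.len t + 1) 1).foldl
    (fun fd i => pvKeywords.foldl
      (fun fd p => if p.1.toList.isPrefixOf (t.toList.drop i.toNat) then PySem.Set.add fd p.2 else fd) fd)
    PySem.Set.empty

def classify_project_type_py_alt (type_str : Option String) : List (String × Bool) :=
  match type_str with
  | none => []
  | some s =>
    if s = "" then [] else
    let t := PySem.Str.strip (PySem.Str.lower s)
    let found := pvScan t
    let result := (["solar", "wind", "ess", "hydro"].filter (fun c => PySem.Set.contains found c)).foldl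
        (fun d c => d.insert c true) PySem.Dict.empty
    let result := if PySem.Dict.size result > 1 || PySem.Set.contains found "hybrid" then result.insert "hybrid" true else result
    result.items

-- ===== PRECONDITION & SPEC =====
def Spec_classify_project_type_py (type_str : Option String) (out : List (String × Bool)) : Prop := out = classify_project_type_py_alt type_str
instance (type_str : Option String) (out : List (String × Bool)) : Decidable (Spec_classify_project_type_py type_str out) := by unfold Spec_classify_project_type_py; infer_instance

-- ===== CLAIM =====
def Claim_equal_classify_project_type_py : Prop := ∀ (type_str : Option String), Dom_classify_project_type_py type_str → Spec_classify_project_type_py type_str (classify_project_type_py type_str)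

-- ===== LEMMAS AND PROOFS =====

-- membership in the inner keyword fold (generalized over the keyword list)
theorem pv_mem_condfold (l : List (String × String)) (q : String × String → Bool)
    (fd : PySem.Set String) (y : String) :
    y ∈ l.foldl (fun fd p => if q p then PySem.Set.add fd p.2 else fd) fd ↔
    y ∈ fd ∨ ∃ p ∈ l, q p = true ∧ y = p.2 := by
  induction l generalizing fd with
  | nil => simp
  | cons p l ih =>
    simp only [List.foldl_cons, ih]
    by_cases hq : q p = true
    · simp only [hq, if_true, PySem.Set.mem_add]
      constructor
      · rintro (⟨h | h⟩ | ⟨r, hr, hqr, hy⟩)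
        · exact Or.inl h
        · exact Or.inr ⟨p, List.mem_cons_self .., hq, h⟩
        · exact Or.inr ⟨r, List.mem_cons_of_mem _ hr, hqr, hy⟩
      · rintro (h | ⟨r, hr, hqr, hy⟩)
        · exact Or.inl (Or.inl h)
        · rcases List.mem_cons.mp hr with rfl | hr
          · exact Or.inl (Or.inr hy)
          · exact Or.inr ⟨r, hr, hqr, hy⟩
    · simp only [hq]
      constructor
      · rintro (h | ⟨r, hr, hqr, hy⟩)
        · exact Or.inl h
        · exact Or.inr ⟨r, List.mem_cons_of_mem _ hr, hqr, hy⟩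
      · rintro (h | ⟨r, hr, hqr, hy⟩)
        · exact Or.inl h
        · rcases List.mem_cons.mp hr with rfl | hr
          · exact absurd hqr hq
          · exact Or.inr ⟨r, hr, hqr, hy⟩

-- membership in the outer position fold
theorem pv_mem_outerfold (is : List Int) (t : String) (fd : PySem.Set String) (y : String) :
    y ∈ is.foldl (fun fd i => pvKeywords.foldl
        (fun fd p => if p.1.toList.isPrefixOf (t.toList.drop i.toNat) then PySem.Set.add fd p.2 else fd) fd) fd ↔
    y ∈ fd ∨ ∃ i ∈ is, ∃ p ∈ pvKeywords, p.1.toList <+: t.toList.drop i.toNat ∧ y = p.2 := by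
  induction is generalizing fd with
  | nil => simp
  | cons i is ih =>
    rw [List.foldl_cons, ih, pv_mem_condfold]
    simp only [List.isPrefixOf_iff_prefix]
    constructor
    · rintro (⟨h | ⟨p, hp, hpre, hy⟩⟩ | ⟨j, hj, p, hp, hpre, hy⟩)
      · exact Or.inl h
      · exact Or.inr ⟨i, List.mem_cons_self .., p, hp, hpre, hy⟩
      · exact Or.inr ⟨j, List.mem_cons_of_mem _ hj, p, hp, hpre, hy⟩
    · rintro (h | ⟨j, hj, p, hp, hpre, hy⟩)
      · exact Or.inl (Or.inl h)
      · rcases List.mem_cons.mp hj with rfl | hj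
        · exact Or.inl (Or.inr ⟨p, hp, hpre, hy⟩)
        · exact Or.inr ⟨j, hj, p, hp, hpre, hy⟩

-- every keyword in the table is nonempty
theorem pv_keywords_ne_nil : ∀ p ∈ pvKeywords, p.1.toList ≠ [] := by decide

-- a nonempty pattern is a prefix at some scanned position iff it is an infix
theorem pv_exists_drop (sub l : List Char) (hsub : sub ≠ []) :
    (∃ i ∈ PySem.List.pyRange 0 ((l.length : Int) + 1) 1, sub <+: l.drop i.toNat) ↔ sub <:+: l := by
  constructor
  · rintro ⟨i, _, hp⟩
    exact (PySem.Chars.isIn_iff_infix sub l).mp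
      ((PySem.Chars.exists_prefix_drop_iff_isIn sub l).mp ⟨i.toNat, hp⟩)
  · intro h
    obtain ⟨j, hj⟩ := (PySem.Chars.exists_prefix_drop_iff_isIn sub l).mpr
      ((PySem.Chars.isIn_iff_infix sub l).mpr h)
    by_cases hle : j ≤ l.length
    · refine ⟨(j : Int), ?_, by simpa using hj⟩
      rw [PySem.List.mem_pyRange_one]
      constructor <;> [positivity; exact_mod_cast by omega]
    · exfalso
      have hnil : l.drop j = [] := List.drop_eq_nil_of_le (by omega)
      rw [hnil] at hj
      exact hsub (List.prefix_nil.mp hj)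

-- membership in the scan = some keyword of the category occurs in the text
theorem pv_mem_scan (t : String) (y : String) :
    y ∈ pvScan t ↔ ∃ p ∈ pvKeywords, p.1.toList <:+: t.toList ∧ y = p.2 := by
  unfold pvScan
  rw [pv_mem_outerfold]
  simp only [PySem.Set.empty, List.not_mem_nil, false_or, PySem.Str.len_eq]
  constructor
  · rintro ⟨i, hi, p, hp, hpre, hy⟩
    exact ⟨p, hp, (pv_exists_drop p.1.toList t.toList (pv_keywords_ne_nil p hp)).mp ⟨i, hi, hpre⟩, hy⟩
  · rintro ⟨p, hp, hinf, hy⟩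
    obtain ⟨i, hi, hpre⟩ := (pv_exists_drop p.1.toList t.toList (pv_keywords_ne_nil p hp)).mpr hinf
    exact ⟨i, hi, p, hp, hpre, hy⟩

theorem pv_scan_contains (t : String) (y : String) :
    PySem.Set.contains (pvScan t) y = true ↔ ∃ p ∈ pvKeywords, p.1.toList <:+: t.toList ∧ y = p.2 := by
  rw [PySem.Set.contains_iff, pv_mem_scan]

theorem pv_scan_solar (t : String) :
    PySem.Set.contains (pvScan t) "solar" = PySem.Str.isIn "solar" t := by
  have h := pv_scan_contains t "solar"
  have h2 := PySem.Str.isIn_iff_infix "solar" t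
  simp only [pvKeywords] at h
  cases hc : PySem.Set.contains (pvScan t) "solar" <;> cases hi : PySem.Str.isIn "solar" t <;>
    simp_all

theorem pv_scan_wind (t : String) :
    PySem.Set.contains (pvScan t) "wind" = PySem.Str.isIn "wind" t := by
  have h := pv_scan_contains t "wind"
  have h2 := PySem.Str.isIn_iff_infix "wind" t
  simp only [pvKeywords] at h
  cases hc : PySem.Set.contains (pvScan t) "wind" <;> cases hi : PySem.Str.isIn "wind" t <;>
    simp_all

theorem pv_scan_ess (t : String) :
    PySem.Set.contains (pvScan t) "ess" =
      (PySem.Str.isIn "ess" t || PySem.Str.isIn "energy storage" t || PySem.Str.isIn "bess" t) := by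
  have h := pv_scan_contains t "ess"
  have h2 := PySem.Str.isIn_iff_infix "ess" t
  have h3 := PySem.Str.isIn_iff_infix "energy storage" t
  have h4 := PySem.Str.isIn_iff_infix "bess" t
  simp only [pvKeywords] at h
  cases hc : PySem.Set.contains (pvScan t) "ess" <;>
    cases hi : PySem.Str.isIn "ess" t <;>
    cases hj : PySem.Str.isIn "energy storage" t <;>
    cases hk : PySem.Str.isIn "bess" t <;> simp_all

theorem pv_scan_hydro (t : String) :
    PySem.Set.contains (pvScan t) "hydro" =
      (PySem.Str.isIn "hydro" t || PySem.Str.isIn "pump" t || PySem.Str.isIn "psp" t) := by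
  have h := pv_scan_contains t "hydro"
  have h2 := PySem.Str.isIn_iff_infix "hydro" t
  have h3 := PySem.Str.isIn_iff_infix "pump" t
  have h4 := PySem.Str.isIn_iff_infix "psp" t
  simp only [pvKeywords] at h
  cases hc : PySem.Set.contains (pvScan t) "hydro" <;>
    cases hi : PySem.Str.isIn "hydro" t <;>
    cases hj : PySem.Str.isIn "pump" t <;>
    cases hk : PySem.Str.isIn "psp" t <;> simp_all

theorem pv_scan_hybrid (t : String) :
    PySem.Set.contains (pvScan t) "hybrid" = PySem.Str.isIn "hybrid" t := by
  have h := pv_scan_contains t "hybrid"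
  have h2 := PySem.Str.isIn_iff_infix "hybrid" t
  simp only [pvKeywords] at h
  cases hc : PySem.Set.contains (pvScan t) "hybrid" <;> cases hi : PySem.Str.isIn "hybrid" t <;>
    simp_all

-- both bodies agree for every lowered/stripped text t
theorem pv_core (t : String) :
    (let categories : List String := []
     let categories := if PySem.Str.isIn "solar" t then categories ++ ["solar"] else categories
     let categories := if PySem.Str.isIn "wind" t then categories ++ ["wind"] else categories
     let categories := if PySem.Str.isIn "ess" t || PySem.Str.isIn "energy storage" t || PySem.Str.isIn "bess" t then categories ++ ["ess"] else categories
     let categories := if PySem.Str.isIn "hydro" t || PySem.Str.isIn "pump" t || PySem.Str.isIn "psp" t then categories ++ ["hydro"] else categories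
     let categories := if categories.length > 1 || PySem.Str.isIn "hybrid" t then categories ++ ["hybrid"] else categories
     (categories.foldl (fun d c => d.insert c true) PySem.Dict.empty).items) =
    (let found := pvScan t
     let result := (["solar", "wind", "ess", "hydro"].filter (fun c => PySem.Set.contains found c)).foldl
         (fun d c => d.insert c true) PySem.Dict.empty
     let result := if PySem.Dict.size result > 1 || PySem.Set.contains found "hybrid" then result.insert "hybrid" true else result
     result.items) := by
  simp only [pv_scan_solar, pv_scan_wind, pv_scan_ess, pv_scan_hydro, pv_scan_hybrid,
    List.filter]
  cases h1 : PySem.Str.isIn "solar" t <;>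
  cases h2 : PySem.Str.isIn "wind" t <;>
  cases h3 : PySem.Str.isIn "ess" t <;>
  cases h4 : PySem.Str.isIn "energy storage" t <;>
  cases h5 : PySem.Str.isIn "bess" t <;>
  cases h6 : PySem.Str.isIn "hydro" t <;>
  cases h7 : PySem.Str.isIn "pump" t <;>
  cases h8 : PySem.Str.isIn "psp" t <;>
  cases h9 : PySem.Str.isIn "hybrid" t <;>
  rfl

-- ===== VERDICT =====
theorem classify_project_type_py_spec : Claim_equal_classify_project_type_py := by
  intro type_str _
  unfold Spec_classify_project_type_py
  cases type_str with
  | none => rfl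
  | some s =>
    by_cases hs : s = ""
    · simp [classify_project_type_py, classify_project_type_py_alt, hs]
    · simp only [classify_project_type_py, classify_project_type_py_alt, hs, if_false]
      exact pv_core _
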